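-- pv_equiv track=rewrite | github.com/Method68/Rubiks | resolveSecondStep.py | allRingPos
-- ===== SOURCE A (Python) =====
-- def allRingPos(rubiks, allringvalue):
-- 	allringpos = []
-- 	for value in allringvalue:
-- 		for elem in rubiks:
-- 			i = 0
-- 			for row in rubiks[elem]:
-- 				if value[0] in row:
-- 					pos = row.index(value[0])
-- 					if value[1] != elem:
-- 						allringpos.append((elem, i, pos, value[1], value[2], value[3]))
-- 					elif value[2] != i or value[3] != pos:
-- 						allringpos.append((elem, i, pos, value[1], value[2], value[3]))
-- 				i += 1
-- 	return allringpos
-- ===== SOURCE B (Python) =====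
-- def allRingPos(rubiks, allringvalue):
--     # Build once: sticker value -> list of (face, row, first-column) in cube scan order.
--     index = {}
--     for elem, face in rubiks.items():
--         for i, row in enumerate(face):
--             for v in dict.fromkeys(row):
--                 index.setdefault(v, []).append((elem, i, row.index(v)))
--     out = []
--     for v0, v1, v2, v3 in allringvalue:
--         for elem, i, pos in index.get(v0, []):
--             if (elem, i, pos) != (v1, v2, v3):
--                 out.append((elem, i, pos, v1, v2, v3))
--     return out
-- ===== Notes on version B (the rewrite author's own statement) =====
-- stated objective: faster
-- what changed: B scans the cube once to build a dict from sticker value to its (face,row,first-column) positions, then answers each allringvalue entry by one dict lookup, instead of A's full nested rescan of the whole cube for every entry.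
import Mathlib
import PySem

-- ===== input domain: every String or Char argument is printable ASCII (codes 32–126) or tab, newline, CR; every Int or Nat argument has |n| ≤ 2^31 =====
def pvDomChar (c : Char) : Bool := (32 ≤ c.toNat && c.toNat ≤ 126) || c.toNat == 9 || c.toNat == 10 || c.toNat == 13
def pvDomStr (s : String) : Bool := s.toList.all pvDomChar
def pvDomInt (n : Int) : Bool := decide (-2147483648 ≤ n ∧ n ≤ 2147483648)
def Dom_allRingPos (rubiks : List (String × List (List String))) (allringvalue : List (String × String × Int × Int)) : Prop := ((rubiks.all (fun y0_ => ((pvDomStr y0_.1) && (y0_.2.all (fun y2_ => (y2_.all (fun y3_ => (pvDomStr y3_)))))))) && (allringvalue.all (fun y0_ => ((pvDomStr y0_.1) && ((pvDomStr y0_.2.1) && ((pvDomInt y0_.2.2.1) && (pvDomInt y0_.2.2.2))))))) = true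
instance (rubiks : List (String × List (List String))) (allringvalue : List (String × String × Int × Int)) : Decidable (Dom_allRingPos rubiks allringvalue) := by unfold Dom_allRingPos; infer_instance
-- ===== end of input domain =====

-- B builds a sticker-value → positions index in one cube scan instead of A's full rescan per entry.

-- ===== PORT A =====
def allRingPos (rubiks : List (String × List (List String))) (allringvalue : List (String × String × Int × Int)) : List (String × Int × Int × String × Int × Int) :=
  let d := PySem.Dict.ofList rubiks          -- the Python dict argument
  allringvalue.foldl (fun allringpos value =>
    d.items.foldl (fun allringpos p =>       -- for elem in rubiks: … rubiks[elem]
      let elem := p.1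
      (PySem.List.enumerate p.2 0).foldl (fun allringpos q =>   -- i = 0; …; i += 1
        let i := q.1
        let row := q.2
        if row.contains value.1 then         -- value[0] in row
          match PySem.List.index? row value.1 with   -- row.index(value[0])
          | some pos =>
            if value.2.1 ≠ elem then
              allringpos ++ [(elem, i, (pos : Int), value.2.1, value.2.2.1, value.2.2.2)]
            else if value.2.2.1 ≠ i ∨ value.2.2.2 ≠ (pos : Int) then
              allringpos ++ [(elem, i, (pos : Int), value.2.1, value.2.2.1, value.2.2.2)]
            else allringpos
          | none => allringpos               -- unreachable: value[0] ∈ row just checked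
        else allringpos) allringpos) allringpos) []

-- ===== PORT B =====
-- index = {}; for elem, face in rubiks.items(): for i, row in enumerate(face):
--   for v in dict.fromkeys(row): index.setdefault(v, []).append((elem, i, row.index(v)))
-- (setdefault(v, []).append(t) acts as index[v] = index.get(v, []) + [t] → Dict.modify)
def pvBuildIndex (items : List (String × List (List String))) : PySem.Dict String (List (String × Int × Int)) :=
  items.foldl (fun index p =>
    (PySem.List.enumerate p.2 0).foldl (fun index q =>
      (PySem.List.dedup q.2).foldl (fun index v =>        -- for v in dict.fromkeys(row)
        match PySem.List.index? q.2 v with                -- row.index(v)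
        | some j => index.modify v [] (· ++ [(p.1, q.1, (j : Int))])
        | none => index)                                  -- unreachable: v ∈ row
        index) index) PySem.Dict.empty

def allRingPos_alt (rubiks : List (String × List (List String))) (allringvalue : List (String × String × Int × Int)) : List (String × Int × Int × String × Int × Int) :=
  let index := pvBuildIndex (PySem.Dict.ofList rubiks).items
  allringvalue.foldl (fun out v =>
    (index.getD v.1 []).foldl (fun out e =>               -- for elem, i, pos in index.get(v0, [])
      if (e.1, e.2.1, e.2.2) ≠ (v.2.1, v.2.2.1, v.2.2.2) then
        out ++ [(e.1, e.2.1, e.2.2, v.2.1, v.2.2.1, v.2.2.2)]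
      else out) out) []

-- ===== PRECONDITION & SPEC =====
def Spec_allRingPos (rubiks : List (String × List (List String))) (allringvalue : List (String × String × Int × Int)) (out : List (String × Int × Int × String × Int × Int)) : Prop := out = allRingPos_alt rubiks allringvalue
instance (rubiks : List (String × List (List String))) (allringvalue : List (String × String × Int × Int)) (out : List (String × Int × Int × String × Int × Int)) : Decidable (Spec_allRingPos rubiks allringvalue out) := by unfold Spec_allRingPos; infer_instance

-- ===== CLAIM (what is proved, stated in full; the proofs are below) =====
def Claim_equal_allRingPos : Prop := ∀ (rubiks : List (String × List (List String))) (allringvalue : List (String × String × Int × Int)), Dom_allRingPos rubiks allringvalue → Spec_allRingPos rubiks allringvalue (allRingPos rubiks allringvalue)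

-- ===== LEMMAS AND PROOFS =====

lemma pv_foldl_flatMap {α β γ : Type} (l : List α) (g : α → List β) (f : γ → β → γ) (init : γ) :
    (l.flatMap g).foldl f init = l.foldl (fun acc x => (g x).foldl f acc) init := by
  induction l generalizing init with
  | nil => rfl
  | cons a t ih => simp [List.flatMap_cons, List.foldl_append, ih]

-- A's inner row step, reified as the list it appends for one row
def pvRowA (v : String × String × Int × Int) (elem : String) (q : Int × List String) :
    List (String × Int × Int × String × Int × Int) :=
  if q.2.contains v.1 then
    match PySem.List.index? q.2 v.1 with
    | some pos =>
      if v.2.1 ≠ elem then [(elem, q.1, (pos : Int), v.2.1, v.2.2.1, v.2.2.2)]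
      else if v.2.2.1 ≠ q.1 ∨ v.2.2.2 ≠ (pos : Int) then
        [(elem, q.1, (pos : Int), v.2.1, v.2.2.1, v.2.2.2)]
      else []
    | none => []
  else []

-- the flat list of (sticker value, (face, row, first column)) entries, in scan order
def pvPairs (items : List (String × List (List String))) : List (String × String × Int × Int) :=
  items.flatMap (fun p => (PySem.List.enumerate p.2 0).flatMap (fun q =>
    (PySem.List.dedup q.2).map (fun c => (c, p.1, q.1, ((PySem.List.index? q.2 c).getD 0 : Int)))))

-- B's per-value segment
def pvSegB (items : List (String × List (List String))) (v : String × String × Int × Int) :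
    List (String × Int × Int × String × Int × Int) :=
  ((((pvPairs items).filter (fun p => p.1 == v.1)).map (fun p => p.2)).filter
      (fun e => decide ((e.1, e.2.1, e.2.2) ≠ (v.2.1, v.2.2.1, v.2.2.2)))).map
    (fun e => (e.1, e.2.1, e.2.2, v.2.1, v.2.2.1, v.2.2.2))

lemma pvBuildIndex_eq (items : List (String × List (List String))) :
    pvBuildIndex items
      = (pvPairs items).foldl (fun d p => d.modify p.1 [] (· ++ [p.2])) PySem.Dict.empty := by
  unfold pvBuildIndex pvPairs
  rw [pv_foldl_flatMap]
  refine PySem.List.foldl_congr_mem _ _ _ _ (fun d p hp => ?_)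
  rw [pv_foldl_flatMap]
  refine PySem.List.foldl_congr_mem _ _ _ _ (fun d q hq => ?_)
  rw [List.foldl_map]
  refine PySem.List.foldl_congr_mem _ _ _ _ (fun d c hc => ?_)
  have hmem : c ∈ q.2 := (PySem.List.mem_dedup q.2 c).1 hc
  obtain ⟨k, hk⟩ := Option.isSome_iff_exists.1 ((PySem.List.index?_isSome_iff q.2 c).2 hmem)
  simp only [PySem.List.index?_eq_idxOf?] at hk
  simp [hk]

lemma pvIndex_getD (items : List (String × List (List String))) (c : String) :
    (pvBuildIndex items).getD c []
      = ((pvPairs items).filter (fun p => p.1 == c)).map (fun p => p.2) := by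
  rw [pvBuildIndex_eq, PySem.Dict.getD_foldl_modify_append]
  simp

lemma pv_nodup_filter_beq (l : List String) (c : String) (hn : l.Nodup) :
    l.filter (fun x => x == c) = if c ∈ l then [c] else [] := by
  induction l with
  | nil => simp
  | cons a t ih =>
    rcases List.nodup_cons.1 hn with ⟨ha, ht⟩
    by_cases h : a = c
    · subst h
      have : t.filter (fun x => x == a) = [] :=
        List.filter_eq_nil_iff.2 (fun x hx => by simp only [beq_iff_eq]; rintro rfl; exact ha hx)
      simp [this]
    · simp only [List.filter_cons, beq_iff_eq, h, if_false, List.mem_cons]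
      rw [ih ht]
      by_cases hm : c ∈ t <;> simp [hm, Ne.symm h]

lemma pv_dedup_filter (xs : List String) (c : String) :
    (PySem.List.dedup xs).filter (fun x => x == c) = if c ∈ xs then [c] else [] := by
  rw [pv_nodup_filter_beq _ _ (PySem.List.nodup_dedup xs)]
  simp only [PySem.List.mem_dedup]

-- A's row body appends exactly pvRowA
lemma pv_body_eq (v : String × String × Int × Int) (elem : String)
    (acc : List (String × Int × Int × String × Int × Int)) (q : Int × List String) :
    (if q.2.contains v.1 then
      match PySem.List.index? q.2 v.1 with
      | some pos =>
        if v.2.1 ≠ elem then acc ++ [(elem, q.1, (pos : Int), v.2.1, v.2.2.1, v.2.2.2)]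
        else if v.2.2.1 ≠ q.1 ∨ v.2.2.2 ≠ (pos : Int) then
          acc ++ [(elem, q.1, (pos : Int), v.2.1, v.2.2.1, v.2.2.2)]
        else acc
      | none => acc
    else acc) = acc ++ pvRowA v elem q := by
  unfold pvRowA
  by_cases hc : q.2.contains v.1 <;> simp only [hc, if_true, Bool.false_eq_true, if_false] <;>
    [skip; simp]
  rcases h : PySem.List.index? q.2 v.1 with _ | pos <;> simp only [h] <;> [simp; split_ifs <;> simp]

lemma pv_rows_eq (v : String × String × Int × Int) (elem : String)
    (rows : List (Int × List String)) (acc : List (String × Int × Int × String × Int × Int)) :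
    rows.foldl (fun acc q =>
      if q.2.contains v.1 then
        match PySem.List.index? q.2 v.1 with
        | some pos =>
          if v.2.1 ≠ elem then acc ++ [(elem, q.1, (pos : Int), v.2.1, v.2.2.1, v.2.2.2)]
          else if v.2.2.1 ≠ q.1 ∨ v.2.2.2 ≠ (pos : Int) then
            acc ++ [(elem, q.1, (pos : Int), v.2.1, v.2.2.1, v.2.2.2)]
          else acc
        | none => acc
      else acc) acc = acc ++ rows.flatMap (pvRowA v elem) := by
  induction rows generalizing acc with
  | nil => simp
  | cons r t ih => rw [List.foldl_cons, pv_body_eq, ih, List.flatMap_cons, List.append_assoc]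

lemma pv_faces_eq (v : String × String × Int × Int) (items : List (String × List (List String)))
    (acc : List (String × Int × Int × String × Int × Int)) :
    items.foldl (fun acc p =>
      (PySem.List.enumerate p.2 0).foldl (fun acc q =>
        if q.2.contains v.1 then
          match PySem.List.index? q.2 v.1 with
          | some pos =>
            if v.2.1 ≠ p.1 then acc ++ [(p.1, q.1, (pos : Int), v.2.1, v.2.2.1, v.2.2.2)]
            else if v.2.2.1 ≠ q.1 ∨ v.2.2.2 ≠ (pos : Int) then
              acc ++ [(p.1, q.1, (pos : Int), v.2.1, v.2.2.1, v.2.2.2)]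
            else acc
          | none => acc
        else acc) acc) acc
    = acc ++ items.flatMap (fun p => (PySem.List.enumerate p.2 0).flatMap (pvRowA v p.1)) := by
  induction items generalizing acc with
  | nil => simp
  | cons a t ih => rw [List.foldl_cons, pv_rows_eq, ih, List.flatMap_cons, List.append_assoc]

-- A flattened
lemma pvA_flat (rubiks : List (String × List (List String))) (arv : List (String × String × Int × Int)) :
    allRingPos rubiks arv
      = arv.flatMap (fun v => (PySem.Dict.ofList rubiks).items.flatMap (fun p =>
          (PySem.List.enumerate p.2 0).flatMap (pvRowA v p.1))) := by
  unfold allRingPos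
  have main : ∀ (acc : List (String × Int × Int × String × Int × Int)),
      arv.foldl (fun allringpos value =>
        (PySem.Dict.ofList rubiks).items.foldl (fun allringpos p =>
          (PySem.List.enumerate p.2 0).foldl (fun allringpos q =>
            if q.2.contains value.1 then
              match PySem.List.index? q.2 value.1 with
              | some pos =>
                if value.2.1 ≠ p.1 then allringpos ++ [(p.1, q.1, (pos : Int), value.2.1, value.2.2.1, value.2.2.2)]
                else if value.2.2.1 ≠ q.1 ∨ value.2.2.2 ≠ (pos : Int) then
                  allringpos ++ [(p.1, q.1, (pos : Int), value.2.1, value.2.2.1, value.2.2.2)]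
                else allringpos
              | none => allringpos
            else allringpos) allringpos) allringpos) acc
      = acc ++ arv.flatMap (fun v => (PySem.Dict.ofList rubiks).items.flatMap (fun p =>
          (PySem.List.enumerate p.2 0).flatMap (pvRowA v p.1))) := by
    induction arv with
    | nil => simp
    | cons a t ih =>
      intro acc
      rw [List.foldl_cons, pv_faces_eq, ih, List.flatMap_cons, List.append_assoc]
  exact (main []).trans (List.nil_append _)

-- B flattened
lemma pvB_flat (rubiks : List (String × List (List String))) (arv : List (String × String × Int × Int)) :
    allRingPos_alt rubiks arv
      = arv.flatMap (fun v => pvSegB (PySem.Dict.ofList rubiks).items v) := by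
  unfold allRingPos_alt
  have main : ∀ (acc : List (String × Int × Int × String × Int × Int)),
      arv.foldl (fun out v =>
        ((pvBuildIndex (PySem.Dict.ofList rubiks).items).getD v.1 []).foldl (fun out e =>
          if (e.1, e.2.1, e.2.2) ≠ (v.2.1, v.2.2.1, v.2.2.2) then
            out ++ [(e.1, e.2.1, e.2.2, v.2.1, v.2.2.1, v.2.2.2)]
          else out) out) acc
      = acc ++ arv.flatMap (fun v => pvSegB (PySem.Dict.ofList rubiks).items v) := by
    induction arv with
    | nil => simp
    | cons a t ih =>
      intro acc
      rw [List.foldl_cons,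
        PySem.List.foldl_append_ite
          (fun (e : String × Int × Int) => (e.1, e.2.1, e.2.2) ≠ (a.2.1, a.2.2.1, a.2.2.2))
          (fun (e : String × Int × Int) => (e.1, e.2.1, e.2.2, a.2.1, a.2.2.1, a.2.2.2)),
        pvIndex_getD, ih, List.flatMap_cons, List.append_assoc]
      rfl
  exact (main []).trans (List.nil_append _)

-- per-value equality of the two segments
lemma pv_seg_eq (items : List (String × List (List String))) (v : String × String × Int × Int) :
    items.flatMap (fun p => (PySem.List.enumerate p.2 0).flatMap (pvRowA v p.1)) = pvSegB items v := by
  unfold pvSegB pvPairs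
  simp only [List.filter_flatMap, List.map_flatMap]
  refine List.flatMap_congr (fun p hp => ?_)
  refine List.flatMap_congr (fun q hq => ?_)
  rw [List.filter_map, List.filter_map]
  simp only [Function.comp_def]
  rw [pv_dedup_filter]
  by_cases hm : v.1 ∈ q.2
  · rw [if_pos hm]
    obtain ⟨k, hk⟩ := Option.isSome_iff_exists.1 ((PySem.List.index?_isSome_iff q.2 v.1).2 hm)
    have hc : q.2.contains v.1 = true := by simpa using hm
    have hk' : List.idxOf? v.1 q.2 = some k := by simpa [PySem.List.index?_eq_idxOf?] using hk
    unfold pvRowA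
    rw [if_pos hc, hk]
    simp only [List.map_cons, List.map_nil, List.filter_cons, List.filter_nil]
    by_cases h1 : v.2.1 = p.1 <;> by_cases h2 : v.2.2.1 = q.1 <;> by_cases h3 : v.2.2.2 = (k : Int) <;>
      simp [h1, h2, h3, hk', Prod.ext_iff] <;> split_ifs <;> simp_all
  · rw [if_neg hm]
    have hc : q.2.contains v.1 = false := by simpa using hm
    unfold pvRowA
    simp [hm]

-- ===== VERDICT (by name: the statement is the Claim_ definition above) =====
theorem allRingPos_spec : Claim_equal_allRingPos := by
  intro rubiks arv _
  unfold Spec_allRingPos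
  rw [pvA_flat, pvB_flat]
  exact List.flatMap_congr (fun v _ => pv_seg_eq _ v)
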